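-- pv_equiv track=rewrite | github.com/gmazu/calypso-integration-landscape | Gantt/Manim/gantt_timeline_v2.py | split_by_pipe
-- ===== SOURCE A (Python) =====
-- def split_by_pipe(argv: list[str]) -> list[list[str]]:
--     """Divide argumentos en segmentos separados por '|'."""
--     segments: list[list[str]] = []
--     current: list[str] = []
--     for arg in argv:
--         if arg == "|":
--             segments.append(current)
--             current = []
--         else:
--             current.append(arg)
--     segments.append(current)
--     return segments
-- ===== SOURCE B (Python) =====
-- def split_by_pipe(argv: list[str]) -> list[list[str]]:
--     """Divide argumentos en segmentos separados por '|'."""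
--     bounds = [i for i, a in enumerate(argv) if a == "|"]
--     segments: list[list[str]] = []
--     start = 0
--     for i in bounds:
--         segments.append(argv[start:i])
--         start = i + 1
--     segments.append(argv[start:])
--     return segments
-- ===== Notes on version B (the rewrite author's own statement) =====
-- stated objective: alternative
-- what changed: Instead of accumulating the current segment element by element, B first collects the indices of all '|' delimiters and then slices argv between consecutive boundaries, appending the final slice argv[start:].
import Mathlib
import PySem

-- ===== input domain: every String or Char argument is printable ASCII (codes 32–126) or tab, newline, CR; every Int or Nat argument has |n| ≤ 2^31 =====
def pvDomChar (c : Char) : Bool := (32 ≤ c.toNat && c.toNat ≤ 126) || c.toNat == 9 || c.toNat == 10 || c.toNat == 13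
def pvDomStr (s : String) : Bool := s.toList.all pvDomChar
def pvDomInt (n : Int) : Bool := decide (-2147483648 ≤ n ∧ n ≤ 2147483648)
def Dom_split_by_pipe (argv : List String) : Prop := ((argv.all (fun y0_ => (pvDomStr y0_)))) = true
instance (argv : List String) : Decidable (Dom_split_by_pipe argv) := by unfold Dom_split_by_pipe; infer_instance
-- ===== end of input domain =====

-- B restructures the split: it first collects the indices of all '|' delimiters, then slices
-- argv between consecutive boundaries (objective: alternative decomposition, same cost).

-- ===== PORT A =====
-- one pass, accumulating the current segment and flushing it at each '|'
def split_by_pipe (argv : List String) : List (List String) :=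
  let st := argv.foldl
    (fun (st : List (List String) × List String) arg =>
      if arg = "|" then (st.1 ++ [st.2], []) else (st.1, st.2 ++ [arg]))
    ([], [])
  st.1 ++ [st.2]

-- ===== PORT B =====
-- '[i for i, a in enumerate(argv) if a == "|"]': indices (counted from i) of the pipes
def pipeBounds : Nat → List String → List Nat
  | _, [] => []
  | i, a :: t => if a = "|" then i :: pipeBounds (i + 1) t else pipeBounds (i + 1) t

def split_by_pipe_alt (argv : List String) : List (List String) :=
  let bounds := pipeBounds 0 argv
  let st := bounds.foldl
    (fun (acc : List (List String) × Nat) (i : Nat) =>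
      (acc.1 ++ [PySem.List.slice argv (some (acc.2 : Int)) (some (i : Int))], i + 1))
    (([] : List (List String)), 0)
  st.1 ++ [PySem.List.slice argv (some (st.2 : Int)) none]

-- ===== PRECONDITION & SPEC =====
def Spec_split_by_pipe (argv : List String) (out : List (List String)) : Prop := out = split_by_pipe_alt argv
instance (argv : List String) (out : List (List String)) : Decidable (Spec_split_by_pipe argv out) := by unfold Spec_split_by_pipe; infer_instance

-- ===== CLAIM (what is proved, stated in full; the proofs are below) =====
def Claim_equal_split_by_pipe : Prop := ∀ (argv : List String), Dom_split_by_pipe argv → Spec_split_by_pipe argv (split_by_pipe argv)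

-- ===== LEMMAS AND PROOFS =====

-- reference splitter, head-first
def splits : List String → List (List String)
  | [] => [[]]
  | a :: t => if a = "|" then [] :: splits t
              else ((a :: (splits t).headI) :: (splits t).tail)

theorem splits_ne_nil (xs : List String) : splits xs ≠ [] := by
  cases xs with
  | nil => simp [splits]
  | cons a t => simp only [splits]; split <;> simp

theorem splits_cons_eq (xs : List String) : (splits xs).headI :: (splits xs).tail = splits xs := by
  cases h : splits xs with
  | nil => exact absurd h (splits_ne_nil xs)
  | cons s r => simp

-- A's fold, generalized over the accumulator
theorem A_general (xs : List String) : ∀ (segs : List (List String)) (cur : List String),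
    (let st := xs.foldl
      (fun (st : List (List String) × List String) arg =>
        if arg = "|" then (st.1 ++ [st.2], []) else (st.1, st.2 ++ [arg]))
      (segs, cur)
     st.1 ++ [st.2]) = segs ++ ((cur ++ (splits xs).headI) :: (splits xs).tail) := by
  induction xs with
  | nil => intro segs cur; simp [splits]
  | cons a t ih =>
    intro segs cur
    by_cases h : a = "|"
    · simp only [List.foldl_cons, h, if_true, splits, ih]
      simp [splits_cons_eq]
    · simp only [List.foldl_cons, if_neg h, splits, ih]
      simp

-- B's fold, generalized: start is where the unscanned suffix xs begins, k is where the
-- current (pending) segment begins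
theorem B_general (xs : List String) :
    ∀ (full : List String) (start k : Nat) (segs : List (List String)),
    full.drop start = xs → k ≤ start →
    (let st := (pipeBounds start xs).foldl
      (fun (acc : List (List String) × Nat) (i : Nat) =>
        (acc.1 ++ [PySem.List.slice full (some (acc.2 : Int)) (some (i : Int))], i + 1))
      (segs, k)
     st.1 ++ [PySem.List.slice full (some (st.2 : Int)) none]) =
    segs ++ (((full.drop k).take (start - k) ++ (splits xs).headI) :: (splits xs).tail) := by
  induction xs with
  | nil =>
    intro full start k segs hdrop hk
    have hlen : full.length ≤ start := by
      have := congrArg List.length hdrop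
      simp [List.length_drop] at this
      omega
    simp only [pipeBounds, splits, List.headI, List.tail]
    rw [PySem.List.slice_from_natCast]
    have : (full.drop k).take (start - k) = full.drop k := by
      apply List.take_of_length_le
      simp [List.length_drop]; omega
    simp [this]
  | cons a t ih =>
    intro full start k segs hdrop hk
    have hdrop' : full.drop (start + 1) = t := by
      have : full.drop (start + 1) = (full.drop start).drop 1 := by
        rw [List.drop_drop]
      rw [this, hdrop]; rfl
    have hget : full[start]? = some a := by
      have : (full.drop start)[0]? = some a := by rw [hdrop]; rfl
      simpa using this
    by_cases h : a = "|"
    · rw [show pipeBounds start (a :: t) = start :: pipeBounds (start + 1) t by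
        simp [pipeBounds, h]]
      rw [List.foldl_cons]
      rw [PySem.List.slice_natCast]
      have := ih full (start + 1) (start + 1)
        (segs ++ [(full.drop k).take (start - k)]) hdrop' (le_refl _)
      simp only at this
      rw [this]
      simp only [splits, Nat.sub_self, List.take_zero, List.nil_append]
      rw [splits_cons_eq]
      simp [h]
    · rw [show pipeBounds start (a :: t) = pipeBounds (start + 1) t by
        simp [pipeBounds, h]]
      have := ih full (start + 1) k segs hdrop' (by omega)
      simp only at this
      rw [this]
      have htake : (full.drop k).take (start + 1 - k) = (full.drop k).take (start - k) ++ [a] := by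
        have h1 : start + 1 - k = (start - k) + 1 := by omega
        rw [h1, List.take_add_one]
        have : (full.drop k)[start - k]? = some a := by
          rw [List.getElem?_drop]
          have : k + (start - k) = start := by omega
          rw [this, hget]
        simp [this]
      simp only [splits, if_neg h, List.headI_cons, List.tail_cons, htake]
      simp

-- ===== VERDICT (by name: the statement is the Claim_ definition above) =====
theorem split_by_pipe_spec : Claim_equal_split_by_pipe := by
  intro argv _
  unfold Spec_split_by_pipe split_by_pipe split_by_pipe_alt
  have hA := A_general argv ([] : List (List String)) ([] : List String)
  have hB := B_general argv argv 0 0 ([] : List (List String)) (by simp) (le_refl _)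
  simp only at hA hB
  rw [hA, hB]
  simp
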